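-- pv_equiv track=rewrite | github.com/Xissco/codeWars | Catching Car Mileage Numbers/main.py | is_interesting
-- ===== SOURCE A (Python) =====
-- def is_interesting(number, awesome_phrases):
--     if number < 98: return 0
--     elif number == 98 or number == 99: return 1
--     for x in range(3):
--         num = number + x
--         if num in awesome_phrases: return 2 if not x else 1
--         else:
--             num_str = str(num)
--             if num_str[1:] == '0' * (len(num_str) - 1): return 2 if not x else 1
--             if num_str == num_str[::-1]: return 2 if not x else 1
--             if num_str in "1234567890": return 2 if not x else 1
--             if num_str in "9876543210": return 2 if not x else 1
--     return 0
-- ===== SOURCE B (Python) =====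
-- def _digits(n):
--     # most-significant-first decimal digits of n (n > 0)
--     ds = []
--     while n > 0:
--         ds.append(n % 10)
--         n //= 10
--     ds.reverse()
--     return ds
--
--
-- def _interesting(n, phrases):
--     if n in phrases:
--         return True
--     d = _digits(n)
--     k = len(d)
--     if all(x == 0 for x in d[1:]):
--         return True
--     if d == d[::-1]:
--         return True
--     d0 = d[0]
--     if k <= 11 - d0 and all(d[i] == (d0 + i) % 10 for i in range(k)):
--         return True  # substring of "1234567890"
--     if k <= d0 + 1 and all(d[i] == d0 - i for i in range(k)):
--         return True  # substring of "9876543210"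
--     return False
--
--
-- def is_interesting(number, awesome_phrases):
--     if number < 98:
--         return 0
--     if number == 98 or number == 99:
--         return 1
--     if _interesting(number, awesome_phrases):
--         return 2
--     if _interesting(number + 1, awesome_phrases) or _interesting(number + 2, awesome_phrases):
--         return 1
--     return 0
-- ===== Notes on version B (the rewrite author's own statement) =====
-- stated objective: alternative
-- what changed: B replaces A's string-based tests inside a 3-iteration scoring loop by a pure predicate on the arithmetic digit list (trailing-zeros, digit-palindrome, and arithmetic consecutive-run checks instead of substring tests on '1234567890'/'9876543210'), with the 2-vs-1 scoring unrolled around it; no string conversion at all.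
import Mathlib
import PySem

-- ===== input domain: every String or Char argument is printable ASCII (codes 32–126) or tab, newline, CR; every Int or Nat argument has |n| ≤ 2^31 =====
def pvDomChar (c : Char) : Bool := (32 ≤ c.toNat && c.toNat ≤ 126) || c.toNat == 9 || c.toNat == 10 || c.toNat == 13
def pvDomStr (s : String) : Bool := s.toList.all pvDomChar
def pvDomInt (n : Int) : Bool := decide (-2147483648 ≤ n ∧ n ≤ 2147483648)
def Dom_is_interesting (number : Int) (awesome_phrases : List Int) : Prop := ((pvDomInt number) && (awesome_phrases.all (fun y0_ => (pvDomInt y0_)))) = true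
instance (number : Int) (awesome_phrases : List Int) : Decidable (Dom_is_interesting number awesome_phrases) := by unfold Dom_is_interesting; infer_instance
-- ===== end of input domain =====

-- B replaces A's string tests by arithmetic digit-list tests and unrolls the 2-vs-1 scoring (alternative decomposition, same cost).

-- ===== PORT A =====
-- the 'for x in range(3)' loop with its early returns; '2 if not x else 1' is 'if x == 0 then 2 else 1'
def aGo (number : Int) (awesome_phrases : List Int) : List Int → Int
  | [] => 0
  | x :: rest =>
    let num := number + x
    if awesome_phrases.contains num then (if x == 0 then 2 else 1)
    else
      let num_str := PySem.Int.toChars num  -- str(num) (list-of-chars side of PySem.Int.toStr)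
      if PySem.List.slice num_str (some 1) none == PySem.List.pyRepeat ['0'] (PySem.Chars.len num_str - 1) then (if x == 0 then 2 else 1)
      else if num_str == num_str.reverse then (if x == 0 then 2 else 1)  -- num_str[::-1] (PySem.List.slice?_none_none_neg_one)
      else if PySem.Chars.isIn num_str "1234567890".toList then (if x == 0 then 2 else 1)
      else if PySem.Chars.isIn num_str "9876543210".toList then (if x == 0 then 2 else 1)
      else aGo number awesome_phrases rest

def is_interesting (number : Int) (awesome_phrases : List Int) : Int :=
  if number < 98 then 0
  else if number == 98 || number == 99 then 1
  else aGo number awesome_phrases (PySem.List.pyRange 0 3 1)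

-- ===== PORT B =====
-- 'while n > 0: ds.append(n % 10); n //= 10' then reverse; recursion on n.toNat (loop runs only for n > 0, where // and % agree with Nat's)
def bDigitsAux : Nat → List Int
  | 0 => []
  | n + 1 => (((n + 1) % 10 : Nat) : Int) :: bDigitsAux ((n + 1) / 10)
  decreasing_by exact Nat.div_lt_self (Nat.succ_pos n) (by omega)

def bDigits (n : Int) : List Int := (bDigitsAux n.toNat).reverse

def bInteresting (n : Int) (phrases : List Int) : Bool :=
  if phrases.contains n then true
  else
    let d := bDigits n
    let k := PySem.List.len d
    if (PySem.List.slice d (some 1) none).all (fun x => x == 0) then true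
    else if d == d.reverse then true
    else
      let d0 := PySem.List.pyGetD d 0 0   -- d[0]; index always in range (d nonempty for every call site, n ≥ 100)
      if decide (k ≤ 11 - d0) && (PySem.List.pyRange 0 k 1).all (fun i => PySem.List.pyGetD d i 0 == PySem.Int.mod (d0 + i) 10) then true
      else if decide (k ≤ d0 + 1) && (PySem.List.pyRange 0 k 1).all (fun i => PySem.List.pyGetD d i 0 == d0 - i) then true
      else false

def is_interesting_alt (number : Int) (awesome_phrases : List Int) : Int :=
  if number < 98 then 0
  else if number == 98 || number == 99 then 1
  else if bInteresting number awesome_phrases then 2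
  else if bInteresting (number + 1) awesome_phrases || bInteresting (number + 2) awesome_phrases then 1
  else 0

-- ===== PRECONDITION & SPEC =====
def Spec_is_interesting (number : Int) (awesome_phrases : List Int) (out : Int) : Prop := out = is_interesting_alt number awesome_phrases
instance (number : Int) (awesome_phrases : List Int) (out : Int) : Decidable (Spec_is_interesting number awesome_phrases out) := by unfold Spec_is_interesting; infer_instance

-- ===== CLAIM (what is proved, stated in full; the proofs are below) =====
def Claim_equal_is_interesting : Prop := ∀ (number : Int) (awesome_phrases : List Int), Dom_is_interesting number awesome_phrases → Spec_is_interesting number awesome_phrases (is_interesting number awesome_phrases)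

-- ===== LEMMAS AND PROOFS =====

-- the digit character map used throughout
def chrD (d : Int) : Char := Nat.digitChar d.toNat

-- A's per-iteration test, as one boolean
def checkA (num : Int) (phrases : List Int) : Bool :=
  if phrases.contains num then true
  else
    let num_str := PySem.Int.toChars num
    if PySem.List.slice num_str (some 1) none == PySem.List.pyRepeat ['0'] (PySem.Chars.len num_str - 1) then true
    else if num_str == num_str.reverse then true
    else if PySem.Chars.isIn num_str "1234567890".toList then true
    else if PySem.Chars.isIn num_str "9876543210".toList then true
    else false

theorem if_chain (c1 c2 c3 c4 c5 : Bool) (r e : Int) :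
    (if c1 = true then r else if c2 = true then r else if c3 = true then r else if c4 = true then r
      else if c5 = true then r else e) =
    (if (if c1 = true then true else if c2 = true then true else if c3 = true then true
      else if c4 = true then true else if c5 = true then true else false) = true then r else e) := by
  cases c1 <;> cases c2 <;> cases c3 <;> cases c4 <;> cases c5 <;> simp

theorem aGo_cons (number : Int) (aw : List Int) (x : Int) (rest : List Int) :
    aGo number aw (x :: rest) =
      if checkA (number + x) aw then (if x == 0 then 2 else 1) else aGo number aw rest := by
  simp only [aGo, checkA]
  exact if_chain _ _ _ _ _ _ _

theorem bDigitsAux_eq (m : Nat) : bDigitsAux m = (Nat.digits 10 m).map (fun m : Nat => (m : Int)) := by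
  induction m using Nat.strong_induction_on with
  | _ m ih =>
    match m with
    | 0 => simp [bDigitsAux]
    | n + 1 =>
      rw [bDigitsAux, Nat.digits_def' (by omega : 1 < 10) (Nat.succ_pos n),
        List.map_cons, ih ((n + 1) / 10) (Nat.div_lt_self (Nat.succ_pos n) (by omega))]

theorem toDigitsCore_eq : ∀ (fuel m : Nat) (ds : List Char), 0 < m → m ≤ fuel →
    Nat.toDigitsCore 10 fuel m ds = ((Nat.digits 10 m).map Nat.digitChar).reverse ++ ds := by
  intro fuel
  induction fuel with
  | zero => intro m ds h1 h2; omega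
  | succ f ih =>
    intro m ds h1 h2
    rw [Nat.toDigitsCore.eq_def]
    simp only
    rw [Nat.digits_def' (by omega : 1 < 10) h1]
    by_cases h : m / 10 = 0
    · simp [h]
    · rw [if_neg h, ih (m / 10) _ (Nat.pos_of_ne_zero h)
        (by have := Nat.div_lt_self h1 (by omega : 1 < 10); omega)]
      simp

theorem toChars_eq (n : Int) (hn : 0 < n) :
    PySem.Int.toChars n = (bDigits n).map chrD := by
  have h0 : ¬ n < 0 := by omega
  have hpos : 0 < n.toNat := by omega
  rw [PySem.Int.toChars, if_neg h0, Nat.toDigits,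
    toDigitsCore_eq (n.toNat + 1) n.toNat [] hpos (by omega),
    bDigits, bDigitsAux_eq, List.map_reverse, List.map_map]
  simp [chrD]

theorem bDigits_bounds (n : Int) : ∀ d ∈ bDigits n, 0 ≤ d ∧ d < 10 := by
  intro d hd
  rw [bDigits, List.mem_reverse, bDigitsAux_eq, List.mem_map] at hd
  obtain ⟨a, ha, rfl⟩ := hd
  have := Nat.digits_lt_base (by omega : 1 < 10) ha
  omega

theorem bDigits_ne_nil (n : Int) (hn : 0 < n) : bDigits n ≠ [] := by
  rw [bDigits, bDigitsAux_eq]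
  simp [Nat.digits_ne_nil_iff_ne_zero, show n.toNat ≠ 0 by omega]

theorem bDigits_head_ne_zero (n : Int) (hn : 0 < n) : (bDigits n).head? ≠ some 0 := by
  have hnn : n.toNat ≠ 0 := by omega
  have hne : Nat.digits 10 n.toNat ≠ [] := Nat.digits_ne_nil_iff_ne_zero.mpr hnn
  rw [bDigits, List.head?_reverse, bDigitsAux_eq, List.getLast?_map,
    List.getLast?_eq_some_getLast hne]
  simp only [Option.map_some, ne_eq, Option.some.injEq]
  intro h
  have h0 : (Nat.digits 10 n.toNat).getLast hne = 0 := by exact_mod_cast h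
  exact Nat.getLast_digit_ne_zero 10 hnn h0

-- chrD is injective on digits
theorem chrD_inj {d e : Int} (hd : 0 ≤ d ∧ d < 10) (he : 0 ≤ e ∧ e < 10) (h : chrD d = chrD e) : d = e := by
  obtain ⟨hd0, hd1⟩ := hd; obtain ⟨he0, he1⟩ := he
  interval_cases d <;> interval_cases e <;> simp_all [chrD, Nat.digitChar]

theorem chrD_eq_zero {d : Int} (hd : 0 ≤ d ∧ d < 10) : chrD d = '0' ↔ d = 0 := by
  obtain ⟨hd0, hd1⟩ := hd
  interval_cases d <;> simp [chrD, Nat.digitChar]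

theorem map_chrD_inj : ∀ (D E : List Int), (∀ d ∈ D, 0 ≤ d ∧ d < 10) → (∀ d ∈ E, 0 ≤ d ∧ d < 10) →
    (D.map chrD = E.map chrD ↔ D = E) := by
  intro D
  induction D with
  | nil => intro E hD hE; cases E <;> simp
  | cons a D ih =>
    intro E hD hE
    cases E with
    | nil => simp
    | cons b E =>
      simp only [List.map_cons, List.cons.injEq]
      constructor
      · rintro ⟨h1, h2⟩
        exact ⟨chrD_inj (hD a (by simp)) (hE b (by simp)) h1,
          (ih E (fun d hd => hD d (List.mem_cons_of_mem _ hd)) (fun d hd => hE d (List.mem_cons_of_mem _ hd))).mp h2⟩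
      · rintro ⟨rfl, rfl⟩; exact ⟨rfl, rfl⟩

-- the two fixed digit sequences "1234567890" and "9876543210", on the digit side
def SDi : List Int := [1, 2, 3, 4, 5, 6, 7, 8, 9, 0]
def SDd : List Int := [9, 8, 7, 6, 5, 4, 3, 2, 1, 0]

theorem pyGetD_zero_cons (x : Int) (xs : List Int) : PySem.List.pyGetD (x :: xs) 0 0 = x := by
  simp [PySem.List.pyGetD, PySem.List.pyGet?, PySem.List.pyIdx?]

theorem zeros_core (t : List Int) (hb : ∀ x ∈ t, 0 ≤ x ∧ x < 10) :
    (t.map chrD == List.replicate t.length '0') = t.all (fun x => x == 0) := by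
  rw [Bool.eq_iff_iff]
  simp only [beq_iff_eq, List.eq_replicate_iff, List.all_eq_true, List.length_map, true_and,
    List.forall_mem_map]
  constructor
  · intro h x hx; exact (chrD_eq_zero (hb x hx)).mp (h x hx)
  · intro h x hx; exact (chrD_eq_zero (hb x hx)).mpr (h x hx)

-- condition (1): all-zeros after the first digit
theorem cond_zeros (n : Int) (hn : 0 < n) :
    (PySem.List.slice (PySem.Int.toChars n) (some 1) none == PySem.List.pyRepeat ['0'] (PySem.Chars.len (PySem.Int.toChars n) - 1)) =
    (PySem.List.slice (bDigits n) (some 1) none).all (fun x => x == 0) := by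
  have hb := bDigits_bounds n
  obtain ⟨d, t, hD⟩ := List.exists_cons_of_ne_nil (bDigits_ne_nil n hn)
  rw [toChars_eq n hn, PySem.List.slice_from_one, PySem.List.slice_from_one, hD]
  simp only [PySem.Chars.len_eq, List.map_cons, List.tail_cons, List.length_map, List.length_cons]
  rw [PySem.List.pyRepeat_singleton]
  have hcast : (((t.length + 1 : Nat) : Int) - 1).toNat = t.length := by omega
  rw [hcast]
  exact zeros_core t (fun x hx => hb x (hD ▸ List.mem_cons_of_mem d hx))

-- condition (2): palindrome
theorem cond_pal (n : Int) (hn : 0 < n) :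
    (PySem.Int.toChars n == (PySem.Int.toChars n).reverse) = (bDigits n == (bDigits n).reverse) := by
  have hb := bDigits_bounds n
  rw [toChars_eq n hn, Bool.eq_iff_iff, ← List.map_reverse]
  simp only [beq_iff_eq]
  exact map_chrD_inj (bDigits n) (bDigits n).reverse hb (fun x hx => hb x (List.mem_reverse.mp hx))

-- ascending / descending runs: auxiliary recursions matching B's index loops
def ascFrom : Int → List Int → Bool
  | _, [] => true
  | a, d :: r => (d == a % 10) && ascFrom (a + 1) r

def descFrom : Int → List Int → Bool
  | _, [] => true
  | a, d :: r => (d == a) && descFrom (a - 1) r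

theorem all_enum_asc (t : List Int) : ∀ (s a : Int),
    (PySem.List.enumerate t s).all (fun p => p.2 == PySem.Int.mod (a + p.1) 10) = ascFrom (a + s) t := by
  induction t with
  | nil => intro s a; simp [PySem.List.enumerate_nil, ascFrom]
  | cons d r ih =>
    intro s a
    rw [PySem.List.enumerate_cons, List.all_cons, ih (s + 1) a, ascFrom,
      PySem.Int.mod_eq_emod_of_pos (by norm_num)]
    have h1 : a + (s + 1) = (a + s) + 1 := by ring
    rw [h1]

theorem all_enum_desc (t : List Int) : ∀ (s a : Int),
    (PySem.List.enumerate t s).all (fun p => p.2 == a - p.1) = descFrom (a - s) t := by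
  induction t with
  | nil => intro s a; simp [PySem.List.enumerate_nil, descFrom]
  | cons d r ih =>
    intro s a
    rw [PySem.List.enumerate_cons, List.all_cons, ih (s + 1) a, descFrom]
    have h1 : a - (s + 1) = (a - s) - 1 := by ring
    rw [h1]

theorem infix_map_iff (D E : List Int) (hD : ∀ x ∈ D, 0 ≤ x ∧ x < 10) (hE : ∀ x ∈ E, 0 ≤ x ∧ x < 10) :
    D.map chrD <:+: E.map chrD ↔ D <:+: E := by
  constructor
  · intro h
    obtain ⟨tt, h1, h2⟩ := List.infix_iff_prefix_suffix.mp h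
    obtain ⟨p, hp⟩ := h2
    have htt : tt = (E.map chrD).drop p.length := by rw [← hp, List.drop_left]
    rw [htt, ← List.map_drop, List.prefix_iff_eq_take, List.length_map, ← List.map_take] at h1
    have hDeq : D = (E.drop p.length).take D.length :=
      (map_chrD_inj D ((E.drop p.length).take D.length) hD
        (fun x hx => hE x (List.mem_of_mem_drop (List.mem_of_mem_take hx)))).mp h1
    exact hDeq ▸ ((List.take_prefix _ _).isInfix.trans (List.drop_suffix _ _).isInfix)
  · intro h; exact List.IsInfix.map chrD h

theorem asc_prefix : ∀ (D : List Int) (a : Int), 1 ≤ a → a ≤ 10 → ascFrom a D = true →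
    (D.length : Int) ≤ 11 - a → D <+: SDi.drop (a - 1).toNat := by
  intro D
  induction D with
  | nil => intro a _ _ _ _; exact List.nil_prefix
  | cons d r ih =>
    intro a h1 h2 hasc hlen
    simp only [ascFrom, Bool.and_eq_true, beq_iff_eq] at hasc
    obtain ⟨hd, hr⟩ := hasc
    simp only [List.length_cons] at hlen
    by_cases h9 : a ≤ 9
    · have hmod : a % 10 = a := Int.emod_eq_of_lt (by omega) (by omega)
      have hdrop : SDi.drop (a - 1).toNat = a :: SDi.drop ((a + 1) - 1).toNat := by
        interval_cases a <;> rfl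
      rw [hdrop, List.cons_prefix_cons]
      exact ⟨by rw [hd, hmod], ih (a + 1) (by omega) (by omega) hr (by push_cast at hlen ⊢; omega)⟩
    · have ha : a = 10 := by omega
      subst ha
      have hrnil : r = [] := by
        cases r with
        | nil => rfl
        | cons y ys => exfalso; simp only [List.length_cons] at hlen; push_cast at hlen; omega
      subst hrnil
      have hd0 : d = 0 := by norm_num at hd; exact hd
      subst hd0
      decide

theorem asc_complete : ∀ (D : List Int) (j : Nat), j ≤ 9 → D <+: SDi.drop j →
    ascFrom ((j : Int) + 1) D = true ∧ (D.length : Int) ≤ 10 - j := by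
  intro D
  induction D with
  | nil => intro j hj _; exact ⟨rfl, by simp; omega⟩
  | cons d r ih =>
    intro j hj hpre
    have hjlt : j < SDi.length := by simp [SDi]; omega
    rw [List.drop_eq_getElem_cons hjlt, List.cons_prefix_cons] at hpre
    obtain ⟨hd, hr⟩ := hpre
    by_cases hj8 : j ≤ 8
    · have hval : SDi[j] = (j : Int) + 1 := by interval_cases j <;> rfl
      obtain ⟨ha, hl⟩ := ih (j + 1) (by omega) hr
      constructor
      · simp only [ascFrom, Bool.and_eq_true, beq_iff_eq]
        have hmod : ((j : Int) + 1) % 10 = (j : Int) + 1 :=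
          Int.emod_eq_of_lt (by omega) (by omega)
        refine ⟨by rw [hd, hval, hmod], ?_⟩
        have : ((j : Int) + 1) + 1 = ((j + 1 : Nat) : Int) + 1 := by push_cast; ring
        rw [this]; exact ha
      · simp only [List.length_cons]; push_cast at hl ⊢; omega
    · have hj9 : j = 9 := by omega
      subst hj9
      have hval : SDi[(9 : Nat)] = (0 : Int) := rfl
      have hrnil : r = [] := by
        have : SDi.drop 10 = ([] : List Int) := rfl
        rw [this] at hr
        exact List.prefix_nil.mp hr
      subst hrnil
      rw [hd, hval]
      exact ⟨by decide, by simp⟩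

theorem asc_iff (D : List Int) (d : Int) (t : List Int) (hD : D = d :: t)
    (hb : ∀ x ∈ D, 0 ≤ x ∧ x < 10) (hd0 : d ≠ 0) :
    D <:+: SDi ↔ (ascFrom d D = true ∧ (D.length : Int) ≤ 11 - d) := by
  constructor
  · intro h
    obtain ⟨tt, h1, h2⟩ := List.infix_iff_prefix_suffix.mp h
    obtain ⟨p, hp⟩ := h2
    have htt : tt = SDi.drop p.length := by rw [← hp, List.drop_left]
    rw [htt] at h1
    have hlen10 : p.length + tt.length = 10 := by
      have := congrArg List.length hp
      simpa [SDi] using this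
    have hj9 : p.length ≤ 9 := by
      by_contra hc
      have hj10 : p.length = 10 := by
        have : p.length ≤ 10 := by omega
        omega
      have : SDi.drop p.length = ([] : List Int) := by rw [hj10]; rfl
      rw [this, hD] at h1
      exact absurd (List.prefix_nil.mp h1) (by simp)
    obtain ⟨hasc, hlen⟩ := asc_complete D p.length hj9 h1
    have hd' : d = ((p.length : Int) + 1) % 10 := by
      rw [hD] at hasc
      simp only [ascFrom, Bool.and_eq_true, beq_iff_eq] at hasc
      exact hasc.1
    have hj8 : p.length ≤ 8 := by
      by_contra hc
      have h9 : p.length = 9 := by omega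
      rw [h9] at hd'
      norm_num at hd'
      exact hd0 hd'
    have hdj : d = (p.length : Int) + 1 := by
      rw [hd', Int.emod_eq_of_lt (by omega) (by omega)]
    rw [hdj]
    exact ⟨hasc, by omega⟩
  · rintro ⟨hasc, hlen⟩
    have hdb := hb d (hD ▸ List.mem_cons_self)
    have hpre := asc_prefix D d (by omega) (by omega) hasc hlen
    exact hpre.isInfix.trans (List.drop_suffix _ _).isInfix

theorem desc_prefix : ∀ (D : List Int) (a : Int), 0 ≤ a → a ≤ 9 → descFrom a D = true →
    (D.length : Int) ≤ a + 1 → D <+: SDd.drop (9 - a).toNat := by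
  intro D
  induction D with
  | nil => intro a _ _ _ _; exact List.nil_prefix
  | cons d r ih =>
    intro a h1 h2 hdesc hlen
    simp only [descFrom, Bool.and_eq_true, beq_iff_eq] at hdesc
    obtain ⟨hd, hr⟩ := hdesc
    simp only [List.length_cons] at hlen
    by_cases h0 : 1 ≤ a
    · have hdrop : SDd.drop (9 - a).toNat = a :: SDd.drop (9 - (a - 1)).toNat := by
        interval_cases a <;> rfl
      rw [hdrop, List.cons_prefix_cons]
      exact ⟨hd, ih (a - 1) (by omega) (by omega) hr (by push_cast at hlen ⊢; omega)⟩
    · have ha : a = 0 := by omega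
      subst ha
      have hrnil : r = [] := by
        cases r with
        | nil => rfl
        | cons y ys => exfalso; simp only [List.length_cons] at hlen; push_cast at hlen; omega
      subst hrnil
      subst hd
      decide

theorem desc_complete : ∀ (D : List Int) (j : Nat), j ≤ 9 → D <+: SDd.drop j →
    descFrom (9 - (j : Int)) D = true ∧ (D.length : Int) ≤ 10 - j := by
  intro D
  induction D with
  | nil => intro j hj _; exact ⟨rfl, by simp; omega⟩
  | cons d r ih =>
    intro j hj hpre
    have hjlt : j < SDd.length := by simp [SDd]; omega
    rw [List.drop_eq_getElem_cons hjlt, List.cons_prefix_cons] at hpre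
    obtain ⟨hd, hr⟩ := hpre
    have hval : SDd[j] = 9 - (j : Int) := by interval_cases j <;> rfl
    by_cases hj8 : j ≤ 8
    · obtain ⟨ha, hl⟩ := ih (j + 1) (by omega) hr
      constructor
      · simp only [descFrom, Bool.and_eq_true, beq_iff_eq]
        refine ⟨by rw [hd, hval], ?_⟩
        have : 9 - (j : Int) - 1 = 9 - ((j + 1 : Nat) : Int) := by push_cast; ring
        rw [this]; exact ha
      · simp only [List.length_cons]; push_cast at hl ⊢; omega
    · have hj9 : j = 9 := by omega
      subst hj9
      have hrnil : r = [] := by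
        have : SDd.drop 10 = ([] : List Int) := rfl
        rw [this] at hr
        exact List.prefix_nil.mp hr
      subst hrnil
      rw [hd, hval]
      exact ⟨by decide, by simp⟩

theorem desc_iff (D : List Int) (d : Int) (t : List Int) (hD : D = d :: t)
    (hb : ∀ x ∈ D, 0 ≤ x ∧ x < 10) :
    D <:+: SDd ↔ (descFrom d D = true ∧ (D.length : Int) ≤ d + 1) := by
  constructor
  · intro h
    obtain ⟨tt, h1, h2⟩ := List.infix_iff_prefix_suffix.mp h
    obtain ⟨p, hp⟩ := h2
    have htt : tt = SDd.drop p.length := by rw [← hp, List.drop_left]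
    rw [htt] at h1
    have hlen10 : p.length + tt.length = 10 := by
      have := congrArg List.length hp
      simpa [SDd] using this
    have hj9 : p.length ≤ 9 := by
      by_contra hc
      have hj10 : p.length = 10 := by omega
      have : SDd.drop p.length = ([] : List Int) := by rw [hj10]; rfl
      rw [this, hD] at h1
      exact absurd (List.prefix_nil.mp h1) (by simp)
    obtain ⟨hdesc, hlen⟩ := desc_complete D p.length hj9 h1
    have hdj : d = 9 - (p.length : Int) := by
      rw [hD] at hdesc
      simp only [descFrom, Bool.and_eq_true, beq_iff_eq] at hdesc
      exact hdesc.1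
    rw [hdj]
    exact ⟨hdesc, by omega⟩
  · rintro ⟨hdesc, hlen⟩
    have hdb := hb d (hD ▸ List.mem_cons_self)
    have h99 : d ≤ 9 := by omega
    have hpre := desc_prefix D d (by omega) h99 hdesc hlen
    exact hpre.isInfix.trans (List.drop_suffix _ _).isInfix

-- condition (3)
theorem cond_asc (n : Int) (hn : 100 ≤ n) :
    PySem.Chars.isIn (PySem.Int.toChars n) "1234567890".toList =
    (decide ((PySem.List.len (bDigits n)) ≤ 11 - PySem.List.pyGetD (bDigits n) 0 0) &&
      (PySem.List.pyRange 0 (PySem.List.len (bDigits n)) 1).all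
        (fun i => PySem.List.pyGetD (bDigits n) i 0 == PySem.Int.mod (PySem.List.pyGetD (bDigits n) 0 0 + i) 10)) := by
  have hpos : (0 : Int) < n := by omega
  have hb := bDigits_bounds n
  obtain ⟨d, t, hD⟩ := List.exists_cons_of_ne_nil (bDigits_ne_nil n hpos)
  have hd0 : PySem.List.pyGetD (bDigits n) 0 0 = d := by rw [hD]; exact pyGetD_zero_cons d t
  have hne0 : d ≠ 0 := by
    have h := bDigits_head_ne_zero n hpos
    rw [hD] at h
    simpa using h
  have hall : (PySem.List.pyRange 0 (PySem.List.len (bDigits n)) 1).all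
      (fun i => PySem.List.pyGetD (bDigits n) i 0 == PySem.Int.mod (d + i) 10) = ascFrom d (bDigits n) := by
    have h1 := PySem.List.enumerate_eq_map_pyRange (xs := bDigits n) (0 : Int)
    have h2 := all_enum_asc (bDigits n) 0 d
    rw [add_zero] at h2
    rw [← h2, h1, List.all_map]
    rfl
  rw [toChars_eq n hpos]
  have hS : "1234567890".toList = SDi.map chrD := by decide
  rw [hS, Bool.eq_iff_iff, PySem.Chars.isIn_iff_infix,
    infix_map_iff (bDigits n) SDi hb (by decide),
    asc_iff (bDigits n) d t hD hb hne0, hd0, hall,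
    Bool.and_eq_true, decide_eq_true_iff, PySem.List.len_eq]
  constructor
  · rintro ⟨h1, h2⟩; exact ⟨by omega, h1⟩
  · rintro ⟨h1, h2⟩; exact ⟨h2, by omega⟩

-- condition (4)
theorem cond_desc (n : Int) (hn : 100 ≤ n) :
    PySem.Chars.isIn (PySem.Int.toChars n) "9876543210".toList =
    (decide ((PySem.List.len (bDigits n)) ≤ PySem.List.pyGetD (bDigits n) 0 0 + 1) &&
      (PySem.List.pyRange 0 (PySem.List.len (bDigits n)) 1).all
        (fun i => PySem.List.pyGetD (bDigits n) i 0 == PySem.List.pyGetD (bDigits n) 0 0 - i)) := by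
  have hpos : (0 : Int) < n := by omega
  have hb := bDigits_bounds n
  obtain ⟨d, t, hD⟩ := List.exists_cons_of_ne_nil (bDigits_ne_nil n hpos)
  have hd0 : PySem.List.pyGetD (bDigits n) 0 0 = d := by rw [hD]; exact pyGetD_zero_cons d t
  have hall : (PySem.List.pyRange 0 (PySem.List.len (bDigits n)) 1).all
      (fun i => PySem.List.pyGetD (bDigits n) i 0 == d - i) = descFrom d (bDigits n) := by
    have h1 := PySem.List.enumerate_eq_map_pyRange (xs := bDigits n) (0 : Int)
    have h2 := all_enum_desc (bDigits n) 0 d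
    rw [sub_zero] at h2
    rw [← h2, h1, List.all_map]
    rfl
  rw [toChars_eq n hpos]
  have hS : "9876543210".toList = SDd.map chrD := by decide
  rw [hS, Bool.eq_iff_iff, PySem.Chars.isIn_iff_infix,
    infix_map_iff (bDigits n) SDd hb (by decide),
    desc_iff (bDigits n) d t hD hb, hd0, hall,
    Bool.and_eq_true, decide_eq_true_iff, PySem.List.len_eq]
  constructor
  · rintro ⟨h1, h2⟩; exact ⟨by omega, h1⟩
  · rintro ⟨h1, h2⟩; exact ⟨h2, by omega⟩

-- per-number equality of the two interesting-tests
theorem check_eq (n : Int) (aw : List Int) (hn : 100 ≤ n) : checkA n aw = bInteresting n aw := by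
  have hpos : (0 : Int) < n := by omega
  simp only [checkA, bInteresting]
  rw [cond_zeros n hpos, cond_pal n hpos, cond_asc n hn, cond_desc n hn]

-- ===== VERDICT (by name: the statement is the Claim_ definition above) =====
theorem is_interesting_spec : Claim_equal_is_interesting := by
  intro number aw _
  unfold Spec_is_interesting is_interesting is_interesting_alt
  by_cases h1 : number < 98
  · simp [h1]
  · rw [if_neg h1, if_neg h1]
    by_cases h2 : (number == 98 || number == 99) = true
    · rw [if_pos h2, if_pos h2]
    · rw [if_neg h2, if_neg h2]
      have hge : 100 ≤ number := by
        simp only [Bool.or_eq_true, beq_iff_eq] at h2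
        omega
      have hr : PySem.List.pyRange 0 3 1 = [0, 1, 2] := by decide
      rw [hr, aGo_cons, aGo_cons, aGo_cons]
      simp only [add_zero]
      rw [check_eq number aw hge, check_eq (number + 1) aw (by omega), check_eq (number + 2) aw (by omega)]
      simp only [aGo]
      norm_num
      split_ifs <;> first | rfl | tauto
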